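-- pv_equiv track=rewrite | github.com/embydextrous/Interview | graph/bfsdfs/48-maxProductNonIntersecting.py | maxLenPath
-- ===== SOURCE A (Python) =====
-- def maxLenPath(g, u, v, curMax):
--     max1 = 0
--     max2 = 0
--     total = 0
--     for i in g[u]:
--         if i != v:
--             # Necessary because a longer path may exist that may not contain root, have to preserve its length
--             total = max(total, maxLenPath(g, i, u, curMax))
--             # we need to find two max depths whose sum will be maxPathLen including u
--             if (curMax[0] > max1):
--                 max2 = max1
--                 max1 = curMax[0]
--             else:
--                 max2 = max(max2, curMax[0])
--     # Necessary because a longer path may exist that may not contain root, have to preserve its length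
--     # Can be ignored if u is to be included in the path
--     total = max(total, max1 + max2)
--     # this basically gives the current maxDepth
--     curMax[0] = max1 + 1
--     return total
-- ===== SOURCE B (Python) =====
-- def _postorder(g, u, v, order):
--     # phase 1: pure traversal, no arithmetic: list (node, parent) states in postorder
--     for i in g[u]:
--         if i != v:
--             _postorder(g, i, u, order)
--     order.append((u, v))
--
--
-- def maxLenPath(g, u, v, curMax):
--     order = []
--     _postorder(g, u, v, order)
--     # phase 2: one flat loop over the postorder list; heights per state in a dict,
--     # the diameter as a single running maximum over all nodes
--     height = {}
--     best = 0
--     for node, par in order: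
--         d1 = d2 = 0
--         for i in g[node]:
--             if i != par:
--                 h = height[(i, node)]
--                 if h > d1:
--                     d1, d2 = h, d1
--                 elif h > d2:
--                     d2 = h
--         height[(node, par)] = d1 + 1
--         best = max(best, d1 + d2)
--     curMax[0] = height[(u, v)]
--     return best
-- ===== Notes on version B (the rewrite author's own statement) =====
-- stated objective: alternative
-- what changed: B splits A's single recursive DFS (which computes max1/max2/total during the recursion and smuggles depths back through curMax[0]) into two stages: a pure postorder enumeration of (node,parent) states, then one flat loop over that list computing heights in a dictionary and the answer as a single running maximum.
import Mathlib
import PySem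

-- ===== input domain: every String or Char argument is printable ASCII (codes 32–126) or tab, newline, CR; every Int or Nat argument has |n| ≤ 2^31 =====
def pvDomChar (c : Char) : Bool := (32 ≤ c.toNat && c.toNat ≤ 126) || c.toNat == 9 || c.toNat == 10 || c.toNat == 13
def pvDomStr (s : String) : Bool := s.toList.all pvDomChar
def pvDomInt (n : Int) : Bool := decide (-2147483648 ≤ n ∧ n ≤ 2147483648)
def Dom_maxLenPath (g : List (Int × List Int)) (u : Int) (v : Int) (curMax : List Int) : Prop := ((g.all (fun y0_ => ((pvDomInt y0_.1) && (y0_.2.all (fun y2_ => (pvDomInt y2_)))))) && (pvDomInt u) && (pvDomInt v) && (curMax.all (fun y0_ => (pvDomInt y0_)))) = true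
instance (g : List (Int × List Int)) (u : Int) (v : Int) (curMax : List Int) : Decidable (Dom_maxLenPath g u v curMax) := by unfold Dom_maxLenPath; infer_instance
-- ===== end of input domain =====

-- B replaces A's single recursive DFS (max1/max2/total computed during the recursion, depths
-- smuggled back through curMax[0]) by two stages: a pure postorder enumeration of
-- (node, parent) states, then one flat loop over that list computing heights in a dictionary
-- and the answer as a single running maximum (alternative decomposition, same cost).
-- A mutates curMax in place (curMax[0] := root depth); so does B. The equivalence proved
-- here is about the RETURN value only.

-- ===== PORT A =====
-- A recurses over the tree; the depth bound below makes the Lean transcription total: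
-- under Pre_ the traversal revisits no (node, parent) state, so the pigeonhole bound
-- (|g|+1)^2+1 on the recursion depth is never reached and the 0-branch is dead code.
def goA (g : List (Int × List Int)) : Nat → Int → Int → List Int → (Int × List Int)
  | 0, _, _, cm => (0, cm)  -- unreachable under Pre_maxLenPath
  | k+1, u, v, cm =>
    -- for i in g[u]:  (g[u]: under Pre_ the key is present, so getD is exact)
    let st := (PySem.Dict.getD (PySem.Dict.mk g) u []).foldl (fun (st : Int × Int × Int × List Int) i =>
      if i ≠ v then
        let r := goA g k i u st.2.2.2          -- maxLenPath(g, i, u, curMax)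
        let total := max st.2.2.1 r.1          -- total = max(total, …)
        let c0 := r.2.headD 0                  -- curMax[0] (nonempty under Pre_)
        if c0 > st.1 then (c0, st.1, total, r.2)            -- max2 = max1; max1 = curMax[0]
        else (st.1, max st.2.1 c0, total, r.2)              -- max2 = max(max2, curMax[0])
      else st) (0, 0, 0, cm)
    (max st.2.2.1 (st.1 + st.2.1),             -- total = max(total, max1 + max2)
     st.2.2.2.set 0 (st.1 + 1))                -- curMax[0] = max1 + 1

def maxLenPath (g : List (Int × List Int)) (u : Int) (v : Int) (curMax : List Int) : Int :=
  (goA g ((g.length + 1) * (g.length + 1) + 1) u v curMax).1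

-- ===== PORT B =====
-- phase 1: _postorder(g, u, v, order) — pure traversal listing (node, parent) states in
-- postorder; same fuel bound as A's port, the 0-branch unreachable under Pre_maxLenPath.
def po (g : List (Int × List Int)) : Nat → Int → Int → List (Int × Int)
  | 0, _, _ => []  -- unreachable under Pre_maxLenPath
  | k+1, u, v =>
    ((PySem.Dict.getD (PySem.Dict.mk g) u []).foldl
      (fun acc i => if i ≠ v then acc ++ po g k i u else acc) []) ++ [(u, v)]

-- phase 2 body: one entry (node, par) of the flat loop (height dict, running best).
-- Source B indexes height[(i, node)] directly (the key is always present when the loop runs,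
-- postorder lists children first); getD … 0 is exact on every input Pre_ admits.
def stepH (g : List (Int × List Int)) (st : PySem.Dict (Int × Int) Int × Int) (e : Int × Int) :
    PySem.Dict (Int × Int) Int × Int :=
  let dd := (PySem.Dict.getD (PySem.Dict.mk g) e.1 []).foldl (fun (p : Int × Int) i =>
      if i ≠ e.2 then
        let hi := PySem.Dict.getD st.1 (i, e.1) 0
        if hi > p.1 then (hi, p.1)
        else if hi > p.2 then (p.1, hi)
        else p
      else p) (0, 0)
  (st.1.insert (e.1, e.2) (dd.1 + 1), max st.2 (dd.1 + dd.2))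

def maxLenPath_alt (g : List (Int × List Int)) (u : Int) (v : Int) (curMax : List Int) : Int :=
  let order := po g ((g.length + 1) * (g.length + 1) + 1) u v
  -- curMax[0] = height[(u, v)] (in-place mutation; the claim is about the return value)
  (order.foldl (stepH g) ((PySem.Dict.empty : PySem.Dict (Int × Int) Int), 0)).2

-- ===== PRECONDITION & SPEC =====
-- pvSafe g k c p: every non-backtracking walk of g that starts at c with forbidden
-- predecessor p stays within g's keys and is shorter than k (so, with k the pigeonhole
-- bound below, the traversal revisits no (node, parent) state and A's recursion returns).
def pvSafe (g : List (Int × List Int)) : Nat → Int → Int → Bool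
  | 0, _, _ => false
  | k+1, c, p =>
    match PySem.Dict.get? (PySem.Dict.mk g) c with
    | none => false
    | some ns => ns.all (fun i => i == p || pvSafe g k i c)

-- Pre_ = exactly the inputs where Python A returns: curMax nonempty (curMax[0] is always
-- assigned), u a key of g, every node the traversal reaches a key of g, and no infinite
-- recursion (no revisited (node, parent) state), via the pigeonhole depth bound (|g|+1)^2+1.
def Pre_maxLenPath (g : List (Int × List Int)) (u : Int) (v : Int) (curMax : List Int) : Prop :=
  curMax ≠ [] ∧ pvSafe g ((g.length + 1) * (g.length + 1) + 1) u v = true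
instance (g : List (Int × List Int)) (u : Int) (v : Int) (curMax : List Int) : Decidable (Pre_maxLenPath g u v curMax) := by unfold Pre_maxLenPath; infer_instance

def pvWitness_maxLenPath : (List (Int × List Int)) × Int × Int × List Int :=
  ([(0, [1, 2]), (1, [0]), (2, [0, 3]), (3, [2])], 0, -1, [0])

def Spec_maxLenPath (g : List (Int × List Int)) (u : Int) (v : Int) (curMax : List Int) (out : Int) : Prop := out = maxLenPath_alt g u v curMax
instance (g : List (Int × List Int)) (u : Int) (v : Int) (curMax : List Int) (out : Int) : Decidable (Spec_maxLenPath g u v curMax out) := by unfold Spec_maxLenPath; infer_instance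

-- ===== CLAIM (what is proved, stated in full; the proofs are below) =====
def Claim_equal_maxLenPath : Prop := ∀ (g : List (Int × List Int)) (u : Int) (v : Int) (curMax : List Int), Dom_maxLenPath g u v curMax → Pre_maxLenPath g u v curMax → Spec_maxLenPath g u v curMax (maxLenPath g u v curMax)

-- ===== LEMMAS AND PROOFS =====

-- proof-side recursive reference function: (depth, diameter) of the (u, v) subtree
def goB (g : List (Int × List Int)) : Nat → Int → Int → (Int × Int)
  | 0, _, _ => (1, 0)
  | k+1, u, v =>
    let st := (PySem.Dict.getD (PySem.Dict.mk g) u []).foldl (fun (st : Int × Int × Int) i =>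
      if i ≠ v then
        let p := goB g k i u
        let best := max st.2.2 p.2
        if p.1 > st.1 then (p.1, st.1, best)
        else (st.1, max st.2.1 p.1, best)
      else st) (0, 0, 0)
    (st.1 + 1, max st.2.2 (st.1 + st.2.1))

theorem headD_set_zero (cm : List Int) (x : Int) (h : cm ≠ []) : (cm.set 0 x).headD 0 = x := by
  cases cm with
  | nil => exact absurd rfl h
  | cons a t => rfl

theorem set_zero_set_zero (cm : List Int) (a b : Int) : (cm.set 0 a).set 0 b = cm.set 0 b := by
  cases cm <;> rfl

-- A's fold and goB's fold stay in lockstep: A's (max1, max2, total) is goB's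
-- (d1, d2, best), and A's threaded curMax only ever changes at index 0
theorem fold_eq (g : List (Int × List Int)) (k : Nat) (u v : Int)
    (ih : ∀ (i : Int) (cm : List Int), cm ≠ [] → pvSafe g k i u = true →
      goA g k i u cm = ((goB g k i u).2, cm.set 0 (goB g k i u).1)) :
    ∀ (ns : List Int), (∀ i ∈ ns, i = v ∨ pvSafe g k i u = true) →
    ∀ (m1 m2 t : Int) (c : List Int), c ≠ [] →
      ∃ c', ns.foldl (fun (st : Int × Int × Int × List Int) i =>
          if i ≠ v then
            let r := goA g k i u st.2.2.2
            let total := max st.2.2.1 r.1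
            let c0 := r.2.headD 0
            if c0 > st.1 then (c0, st.1, total, r.2)
            else (st.1, max st.2.1 c0, total, r.2)
          else st) (m1, m2, t, c)
        = ((ns.foldl (fun (st : Int × Int × Int) i =>
            if i ≠ v then
              let p := goB g k i u
              let best := max st.2.2 p.2
              if p.1 > st.1 then (p.1, st.1, best)
              else (st.1, max st.2.1 p.1, best)
            else st) (m1, m2, t)).1,
           (ns.foldl (fun (st : Int × Int × Int) i =>
            if i ≠ v then
              let p := goB g k i u
              let best := max st.2.2 p.2
              if p.1 > st.1 then (p.1, st.1, best)
              else (st.1, max st.2.1 p.1, best)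
            else st) (m1, m2, t)).2.1,
           (ns.foldl (fun (st : Int × Int × Int) i =>
            if i ≠ v then
              let p := goB g k i u
              let best := max st.2.2 p.2
              if p.1 > st.1 then (p.1, st.1, best)
              else (st.1, max st.2.1 p.1, best)
            else st) (m1, m2, t)).2.2, c')
        ∧ c' ≠ [] ∧ ∀ x : Int, c'.set 0 x = c.set 0 x := by
  intro ns
  induction ns with
  | nil => intro _ m1 m2 t c hc; exact ⟨c, rfl, hc, fun _ => rfl⟩
  | cons i ns ihns =>
    intro hall m1 m2 t c hc
    have htail : ∀ j ∈ ns, j = v ∨ pvSafe g k j u = true :=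
      fun j hj => hall j (List.mem_cons_of_mem i hj)
    by_cases hiv : i = v
    · simp only [List.foldl_cons, hiv, ne_eq, not_true_eq_false, if_false]
      exact ihns htail m1 m2 t c hc
    · have hsafe : pvSafe g k i u = true := (hall i List.mem_cons_self).resolve_left hiv
      simp only [List.foldl_cons, ne_eq, hiv, not_false_eq_true, if_true,
        ih i c hc hsafe, headD_set_zero c _ hc]
      have hc2 : c.set 0 (goB g k i u).1 ≠ [] := by
        cases c with
        | nil => exact absurd rfl hc
        | cons a t => simp
      by_cases hgt : (goB g k i u).1 > m1
      · simp only [hgt, if_true]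
        obtain ⟨c', h1, h2, h3⟩ := ihns htail _ _ _ (c.set 0 (goB g k i u).1) hc2
        exact ⟨c', h1, h2, fun x => (h3 x).trans (set_zero_set_zero c _ x)⟩
      · simp only [hgt, if_false]
        obtain ⟨c', h1, h2, h3⟩ := ihns htail _ _ _ (c.set 0 (goB g k i u).1) hc2
        exact ⟨c', h1, h2, fun x => (h3 x).trans (set_zero_set_zero c _ x)⟩

theorem go_eq (g : List (Int × List Int)) :
    ∀ (k : Nat) (u v : Int) (cm : List Int), cm ≠ [] → pvSafe g k u v = true →
      goA g k u v cm = ((goB g k u v).2, cm.set 0 (goB g k u v).1) := by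
  intro k
  induction k with
  | zero => intro u v cm _ hsafe; simp [pvSafe] at hsafe
  | succ k ih =>
    intro u v cm hcm hsafe
    simp only [pvSafe] at hsafe
    obtain ⟨ns, hns⟩ : ∃ ns, PySem.Dict.get? (PySem.Dict.mk g) u = some ns := by
      cases h : PySem.Dict.get? (PySem.Dict.mk g) u with
      | none => rw [h] at hsafe; exact absurd hsafe (by simp)
      | some ns => exact ⟨ns, rfl⟩
    rw [hns] at hsafe
    have hall : ∀ i ∈ ns, i = v ∨ pvSafe g k i u = true := by
      intro i hi
      have := List.all_eq_true.mp hsafe i hi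
      rcases Bool.or_eq_true_iff.mp this with h | h
      · exact Or.inl (by simpa using h)
      · exact Or.inr h
    have hgetD : PySem.Dict.getD (PySem.Dict.mk g) u [] = ns := by
      simp [PySem.Dict.getD, hns]
    obtain ⟨c', h1, h2, h3⟩ := fold_eq g k u v (fun i cm h hs => ih i u cm h hs) ns hall 0 0 0 cm hcm
    simp only [goA, goB, hgetD, h1, h3]

-- ===== B side: the staged computation equals goB =====

theorem goB_fuel (g : List (Int × List Int)) :
    ∀ (k k' : Nat) (u v : Int), pvSafe g k u v = true → pvSafe g k' u v = true →
      goB g k u v = goB g k' u v := by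
  intro k
  induction k with
  | zero => intro k' u v h _; simp [pvSafe] at h
  | succ k ih =>
    intro k' u v h h'
    cases k' with
    | zero => simp [pvSafe] at h'
    | succ k' =>
      simp only [pvSafe] at h h'
      cases hg : PySem.Dict.get? (PySem.Dict.mk g) u with
      | none => rw [hg] at h; exact absurd h (by simp)
      | some ns =>
        rw [hg] at h h'
        have hgetD : PySem.Dict.getD (PySem.Dict.mk g) u [] = ns := by
          simp [PySem.Dict.getD, hg]
        have hstep : ∀ (st : Int × Int × Int), ∀ i ∈ ns,
            (if i ≠ v then
              let p := goB g k i u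
              let best := max st.2.2 p.2
              if p.1 > st.1 then (p.1, st.1, best) else (st.1, max st.2.1 p.1, best)
            else st)
            = (if i ≠ v then
              let p := goB g k' i u
              let best := max st.2.2 p.2
              if p.1 > st.1 then (p.1, st.1, best) else (st.1, max st.2.1 p.1, best)
            else st) := by
          intro st i hi
          by_cases hiv : i = v
          · simp [hiv]
          · have hs : pvSafe g k i u = true := by
              rcases Bool.or_eq_true_iff.mp (List.all_eq_true.mp h i hi) with hv | hs
              · exact absurd (by simpa using hv) hiv
              · exact hs
            have hs' : pvSafe g k' i u = true := by
              rcases Bool.or_eq_true_iff.mp (List.all_eq_true.mp h' i hi) with hv | hs'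
              · exact absurd (by simpa using hv) hiv
              · exact hs'
            simp only [ih k' i u hs hs']
        have hfold := PySem.List.foldl_congr_mem (l := ns) (init := ((0 : Int), (0 : Int), (0 : Int)))
          (f := fun (st : Int × Int × Int) i =>
            if i ≠ v then
              let p := goB g k i u
              let best := max st.2.2 p.2
              if p.1 > st.1 then (p.1, st.1, best) else (st.1, max st.2.1 p.1, best)
            else st)
          (g := fun (st : Int × Int × Int) i =>
            if i ≠ v then
              let p := goB g k' i u
              let best := max st.2.2 p.2
              if p.1 > st.1 then (p.1, st.1, best) else (st.1, max st.2.1 p.1, best)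
            else st)
          (fun acc x hx => hstep acc x hx)
        simp only [goB, hgetD, hfold]

theorem safe_children (g : List (Int × List Int)) (k : Nat) (u v : Int) (ns : List Int)
    (hg : PySem.Dict.get? (PySem.Dict.mk g) u = some ns)
    (h : pvSafe g (k+1) u v = true) :
    ∀ i ∈ ns, i = v ∨ pvSafe g k i u = true := by
  simp only [pvSafe, hg] at h
  intro i hi
  rcases Bool.or_eq_true_iff.mp (List.all_eq_true.mp h i hi) with hv | hs
  · exact Or.inl (by simpa using hv)
  · exact Or.inr hs

-- every entry of the height dict is the true height of a safe (node, parent) state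
def GoodH (g : List (Int × List Int)) (h : PySem.Dict (Int × Int) Int) : Prop :=
  ∀ (key : Int × Int) (val : Int), h.get? key = some val →
    ∃ m, pvSafe g m key.1 key.2 = true ∧ val = (goB g m key.1 key.2).1

theorem lookup_correct (g : List (Int × List Int)) (k : Nat) (i u : Int)
    (h : PySem.Dict (Int × Int) Int) (hs : pvSafe g k i u = true) (hg : GoodH g h)
    (hp : (h.get? (i, u)).isSome = true) : h.get? (i, u) = some (goB g k i u).1 := by
  obtain ⟨val, hval⟩ := Option.isSome_iff_exists.mp hp
  obtain ⟨m, hm, hv⟩ := hg (i, u) val hval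
  rw [hval, hv, goB_fuel g m k i u hm hs]

-- goB's fold keeps every component nonnegative
theorem foldB_nonneg (g : List (Int × List Int)) (k : Nat) (u v : Int) :
    ∀ (ns : List Int) (st : Int × Int × Int), 0 ≤ st.1 → 0 ≤ st.2.1 → 0 ≤ st.2.2 →
      0 ≤ (ns.foldl (fun (st : Int × Int × Int) i =>
        if i ≠ v then
          if (goB g k i u).1 > st.1 then ((goB g k i u).1, st.1, max st.2.2 (goB g k i u).2)
          else (st.1, max st.2.1 (goB g k i u).1, max st.2.2 (goB g k i u).2)
        else st) st).1 ∧
      0 ≤ (ns.foldl (fun (st : Int × Int × Int) i =>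
        if i ≠ v then
          if (goB g k i u).1 > st.1 then ((goB g k i u).1, st.1, max st.2.2 (goB g k i u).2)
          else (st.1, max st.2.1 (goB g k i u).1, max st.2.2 (goB g k i u).2)
        else st) st).2.1 ∧
      0 ≤ (ns.foldl (fun (st : Int × Int × Int) i =>
        if i ≠ v then
          if (goB g k i u).1 > st.1 then ((goB g k i u).1, st.1, max st.2.2 (goB g k i u).2)
          else (st.1, max st.2.1 (goB g k i u).1, max st.2.2 (goB g k i u).2)
        else st) st).2.2 := by
  intro ns
  induction ns with
  | nil => intro st h1 h2 h3; exact ⟨h1, h2, h3⟩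
  | cons i ns ihns =>
    intro st h1 h2 h3
    simp only [List.foldl_cons]
    by_cases hiv : i = v
    · simp only [hiv, ne_eq, not_true_eq_false, if_false]
      exact ihns st h1 h2 h3
    · simp only [ne_eq, hiv, not_false_eq_true, if_true]
      by_cases hgt : (goB g k i u).1 > st.1
      · simp only [hgt, if_true]
        exact ihns _ (le_of_lt (lt_of_le_of_lt h1 hgt)) h1 (le_trans h3 (le_max_left _ _))
      · simp only [hgt, if_false]
        exact ihns _ h1 (le_trans h2 (le_max_left _ _)) (le_trans h3 (le_max_left _ _))

theorem goB_diam_nonneg (g : List (Int × List Int)) :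
    ∀ (k : Nat) (u v : Int), 0 ≤ (goB g k u v).2 := by
  intro k u v
  cases k with
  | zero => simp [goB]
  | succ k =>
    simp only [goB]
    obtain ⟨h1, h2, h3⟩ := foldB_nonneg g k u v (PySem.Dict.getD (PySem.Dict.mk g) u [])
      (0, 0, 0) (le_refl 0) (le_refl 0) (le_refl 0)
    exact le_trans (by omega) (le_max_right _ _)

-- shifting the start of a running-max loop: fold from best = max best (fold from 0)
theorem foldmax_shift (g : List (Int × List Int)) (k : Nat) (u v : Int) :
    ∀ (ns : List Int) (b : Int), 0 ≤ b →
      ns.foldl (fun b i => if i ≠ v then max b (goB g k i u).2 else b) b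
        = max b (ns.foldl (fun b i => if i ≠ v then max b (goB g k i u).2 else b) 0) := by
  intro ns
  induction ns with
  | nil => intro b hb; simp [max_eq_left hb]
  | cons i ns ihns =>
    intro b hb
    simp only [List.foldl_cons]
    by_cases hiv : i = v
    · simp only [hiv, ne_eq, not_true_eq_false, if_false]
      exact ihns b hb
    · simp only [ne_eq, hiv, not_false_eq_true, if_true]
      have hd : 0 ≤ (goB g k i u).2 := goB_diam_nonneg g k i u
      rw [ihns (max b (goB g k i u).2) (le_trans hb (le_max_left _ _)),
          ihns (max 0 (goB g k i u).2) (le_max_left _ _),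
          max_eq_right hd, max_assoc]

-- the inner fold of stepH (over correct lookups) computes goB's (d1, d2), and the
-- best component of goB's fold is the running max of the children's diameters
theorem fold_pair (g : List (Int × List Int)) (k : Nat) (u v : Int)
    (h₁ : PySem.Dict (Int × Int) Int) :
    ∀ (ns : List Int), (∀ i ∈ ns, i ≠ v → PySem.Dict.getD h₁ (i, u) 0 = (goB g k i u).1) →
    ∀ (d1 d2 b : Int),
      (ns.foldl (fun (p : Int × Int) i =>
        if i ≠ v then
          if PySem.Dict.getD h₁ (i, u) 0 > p.1 then (PySem.Dict.getD h₁ (i, u) 0, p.1)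
          else if PySem.Dict.getD h₁ (i, u) 0 > p.2 then (p.1, PySem.Dict.getD h₁ (i, u) 0)
          else p
        else p) (d1, d2))
      = ((ns.foldl (fun (st : Int × Int × Int) i =>
          if i ≠ v then
            if (goB g k i u).1 > st.1 then ((goB g k i u).1, st.1, max st.2.2 (goB g k i u).2)
            else (st.1, max st.2.1 (goB g k i u).1, max st.2.2 (goB g k i u).2)
          else st) (d1, d2, b)).1,
         (ns.foldl (fun (st : Int × Int × Int) i =>
          if i ≠ v then
            if (goB g k i u).1 > st.1 then ((goB g k i u).1, st.1, max st.2.2 (goB g k i u).2)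
            else (st.1, max st.2.1 (goB g k i u).1, max st.2.2 (goB g k i u).2)
          else st) (d1, d2, b)).2.1)
      ∧ (ns.foldl (fun (st : Int × Int × Int) i =>
          if i ≠ v then
            if (goB g k i u).1 > st.1 then ((goB g k i u).1, st.1, max st.2.2 (goB g k i u).2)
            else (st.1, max st.2.1 (goB g k i u).1, max st.2.2 (goB g k i u).2)
          else st) (d1, d2, b)).2.2
        = ns.foldl (fun b i => if i ≠ v then max b (goB g k i u).2 else b) b := by
  intro ns
  induction ns with
  | nil => intro _ d1 d2 b; exact ⟨rfl, rfl⟩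
  | cons i ns ihns =>
    intro hlook d1 d2 b
    have htail : ∀ j ∈ ns, j ≠ v → PySem.Dict.getD h₁ (j, u) 0 = (goB g k j u).1 :=
      fun j hj => hlook j (List.mem_cons_of_mem i hj)
    by_cases hiv : i = v
    · simp only [List.foldl_cons, hiv, ne_eq, not_true_eq_false, if_false]
      exact ihns htail d1 d2 b
    · simp only [List.foldl_cons, ne_eq, hiv, not_false_eq_true, if_true,
        hlook i List.mem_cons_self hiv]
      by_cases hgt : (goB g k i u).1 > d1
      · simp only [hgt, if_true]
        exact ihns htail _ _ _
      · simp only [hgt, if_false]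
        by_cases hgt2 : (goB g k i u).1 > d2
        · rw [max_eq_right (le_of_lt hgt2)]
          simp only [hgt2, if_true]
          exact ihns htail _ _ _
        · rw [max_eq_left (not_lt.mp hgt2)]
          simp only [hgt2, if_false]
          exact ihns htail _ _ _

-- processing the concatenated postorder segments of the children of (u, v)
theorem segChildren (g : List (Int × List Int)) (k : Nat) (u v : Int)
    (ihk : ∀ (u' v' : Int) (h : PySem.Dict (Int × Int) Int) (best : Int),
      pvSafe g k u' v' = true → GoodH g h → 0 ≤ best →
      GoodH g ((po g k u' v').foldl (stepH g) (h, best)).1 ∧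
      (∀ key : Int × Int, (h.get? key).isSome = true →
        ((((po g k u' v').foldl (stepH g) (h, best)).1).get? key).isSome = true) ∧
      (((po g k u' v').foldl (stepH g) (h, best)).1).get? (u', v') = some (goB g k u' v').1 ∧
      ((po g k u' v').foldl (stepH g) (h, best)).2 = max best (goB g k u' v').2) :
    ∀ (ns : List Int), (∀ i ∈ ns, i = v ∨ pvSafe g k i u = true) →
    ∀ (h : PySem.Dict (Int × Int) Int) (best : Int), GoodH g h → 0 ≤ best →
      GoodH g (((ns.flatMap (fun i => if i ≠ v then po g k i u else [])).foldl (stepH g) (h, best)).1) ∧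
      (∀ key : Int × Int, (h.get? key).isSome = true →
        ((((ns.flatMap (fun i => if i ≠ v then po g k i u else [])).foldl (stepH g) (h, best)).1).get? key).isSome = true) ∧
      (∀ i ∈ ns, i ≠ v →
        (((ns.flatMap (fun i => if i ≠ v then po g k i u else [])).foldl (stepH g) (h, best)).1).get? (i, u)
          = some (goB g k i u).1) ∧
      ((ns.flatMap (fun i => if i ≠ v then po g k i u else [])).foldl (stepH g) (h, best)).2
        = ns.foldl (fun b i => if i ≠ v then max b (goB g k i u).2 else b) best := by
  intro ns
  induction ns with
  | nil =>
    intro _ h best hg hb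
    exact ⟨hg, fun _ hp => hp, fun i hi => absurd hi (List.not_mem_nil), rfl⟩
  | cons i ns ihns =>
    intro hall h best hg hb
    have htail : ∀ j ∈ ns, j = v ∨ pvSafe g k j u = true :=
      fun j hj => hall j (List.mem_cons_of_mem i hj)
    by_cases hiv : i = v
    · simp only [List.flatMap_cons, hiv, ne_eq, not_true_eq_false, if_false, List.nil_append]
      obtain ⟨c1, c2, c3, c4⟩ := ihns htail h best hg hb
      refine ⟨c1, c2, ?_, ?_⟩
      · intro j hj hjv
        rcases List.mem_cons.mp hj with heq | hj'
        · exact absurd heq hjv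
        · exact c3 j hj' hjv
      · simp only [List.foldl_cons, hiv, ne_eq, not_true_eq_false, if_false]
        exact c4
    · have hs : pvSafe g k i u = true := (hall i List.mem_cons_self).resolve_left hiv
      simp only [List.flatMap_cons, ne_eq, hiv, not_false_eq_true, if_true]
      rw [List.foldl_append]
      obtain ⟨s1, s2, s3, s4⟩ := ihk i u h best hs hg hb
      have hb1 : 0 ≤ ((po g k i u).foldl (stepH g) (h, best)).2 := by
        rw [s4]; exact le_trans hb (le_max_left _ _)
      have hmid : (po g k i u).foldl (stepH g) (h, best)
          = (((po g k i u).foldl (stepH g) (h, best)).1, ((po g k i u).foldl (stepH g) (h, best)).2) := rfl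
      rw [hmid]
      obtain ⟨c1, c2, c3, c4⟩ := ihns htail _ _ s1 hb1
      refine ⟨c1, ?_, ?_, ?_⟩
      · intro key hp
        exact c2 key (s2 key hp)
      · intro j hj hjv
        rcases List.mem_cons.mp hj with heq | hj'
        · subst heq
          have hp := c2 (j, u) (by rw [s3]; rfl)
          exact lookup_correct g k j u _ hs c1 hp
        · exact c3 j hj' hjv
      · rw [c4, s4]
        simp only [List.foldl_cons, ne_eq, hiv, not_false_eq_true, if_true]

theorem seg (g : List (Int × List Int)) :
    ∀ (k : Nat) (u v : Int) (h : PySem.Dict (Int × Int) Int) (best : Int),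
      pvSafe g k u v = true → GoodH g h → 0 ≤ best →
      GoodH g ((po g k u v).foldl (stepH g) (h, best)).1 ∧
      (∀ key : Int × Int, (h.get? key).isSome = true →
        ((((po g k u v).foldl (stepH g) (h, best)).1).get? key).isSome = true) ∧
      (((po g k u v).foldl (stepH g) (h, best)).1).get? (u, v) = some (goB g k u v).1 ∧
      ((po g k u v).foldl (stepH g) (h, best)).2 = max best (goB g k u v).2 := by
  intro k
  induction k with
  | zero => intro u v h best hsafe _ _; simp [pvSafe] at hsafe
  | succ k ih =>
    intro u v h best hsafe hg hb
    obtain ⟨ns, hns⟩ : ∃ ns, PySem.Dict.get? (PySem.Dict.mk g) u = some ns := by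
      cases hx : PySem.Dict.get? (PySem.Dict.mk g) u with
      | none => simp only [pvSafe, hx] at hsafe; exact absurd hsafe (by simp)
      | some ns => exact ⟨ns, rfl⟩
    have hall := safe_children g k u v ns hns hsafe
    have hgetD : PySem.Dict.getD (PySem.Dict.mk g) u [] = ns := by
      simp [PySem.Dict.getD, hns]
    -- postorder of (u, v) = children's segments then the entry (u, v)
    have hpo : po g (k+1) u v
        = (ns.flatMap (fun i => if i ≠ v then po g k i u else [])) ++ [(u, v)] := by
      simp only [po, hgetD]
      congr 1
      rw [PySem.List.foldl_congr_mem ns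
        (fun acc i => if i ≠ v then acc ++ po g k i u else acc)
        (fun acc i => acc ++ (if i ≠ v then po g k i u else [])) []
        (fun acc x _ => by by_cases hx : x = v <;> simp [hx]),
        PySem.List.foldl_append_eq_flatMap]
      simp
    rw [hpo, List.foldl_append]
    obtain ⟨c1, c2, c3, c4⟩ := segChildren g k u v (fun u' v' => ih u' v') ns hall h best hg hb
    set h₁ := ((ns.flatMap (fun i => if i ≠ v then po g k i u else [])).foldl (stepH g) (h, best)).1 with hh₁
    set b₁ := ((ns.flatMap (fun i => if i ≠ v then po g k i u else [])).foldl (stepH g) (h, best)).2 with hb₁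
    have hmid : (ns.flatMap (fun i => if i ≠ v then po g k i u else [])).foldl (stepH g) (h, best) = (h₁, b₁) := rfl
    rw [hmid]
    simp only [List.foldl_cons, List.foldl_nil, stepH, hgetD]
    have hlook : ∀ i ∈ ns, i ≠ v → PySem.Dict.getD h₁ (i, u) 0 = (goB g k i u).1 := by
      intro i hi hiv
      exact PySem.Dict.getD_of_get?_eq_some h₁ 0 (c3 i hi hiv)
    obtain ⟨hdd, hbb⟩ := fold_pair g k u v h₁ ns hlook 0 0 0
    rw [hdd]
    set st := ns.foldl (fun (st : Int × Int × Int) i =>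
        if i ≠ v then
          if (goB g k i u).1 > st.1 then ((goB g k i u).1, st.1, max st.2.2 (goB g k i u).2)
          else (st.1, max st.2.1 (goB g k i u).1, max st.2.2 (goB g k i u).2)
        else st) (0, 0, 0) with hst
    have hgoB : goB g (k+1) u v = (st.1 + 1, max st.2.2 (st.1 + st.2.1)) := by
      simp only [goB, hgetD, hst]
    refine ⟨?_, ?_, ?_, ?_⟩
    · -- GoodH after inserting the (u, v) entry
      intro key val hkey
      rw [PySem.Dict.get?_insert] at hkey
      by_cases hk : key = (u, v)
      · rw [if_pos hk] at hkey
        have hval : val = st.1 + 1 := (Option.some.inj hkey).symm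
        subst hk
        exact ⟨k+1, hsafe, by show val = (goB g (k+1) u v).1; rw [hgoB, hval]⟩
      · rw [if_neg hk] at hkey
        exact c1 key val hkey
    · intro key hp
      rw [PySem.Dict.get?_insert]
      by_cases hk : key = (u, v)
      · rw [if_pos hk]; rfl
      · rw [if_neg hk]; exact c2 key hp
    · rw [PySem.Dict.get?_insert, if_pos rfl, hgoB]
    · have hb₁' : b₁ = max best (ns.foldl (fun b i => if i ≠ v then max b (goB g k i u).2 else b) 0) := by
        rw [c4, foldmax_shift g k u v ns best hb]
      rw [hb₁', hgoB, ← hbb]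
      exact max_assoc best st.2.2 (st.1 + st.2.1)

-- ===== VERDICT (by name: the statement is the Claim_ definition above) =====
theorem maxLenPath_spec : Claim_equal_maxLenPath := by
  intro g u v curMax _hdom hpre
  unfold Spec_maxLenPath maxLenPath maxLenPath_alt
  rw [go_eq g _ u v curMax hpre.1 hpre.2]
  have hempty : GoodH g (PySem.Dict.empty : PySem.Dict (Int × Int) Int) := by
    intro key val hkey
    rw [PySem.Dict.get?_empty] at hkey
    cases hkey
  obtain ⟨_, _, _, h4⟩ := seg g ((g.length + 1) * (g.length + 1) + 1) u v
    (PySem.Dict.empty : PySem.Dict (Int × Int) Int) 0 hpre.2 hempty (le_refl 0)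
  rw [h4, max_eq_right (goB_diam_nonneg g _ u v)]
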